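-- pv_equiv track=rewrite | github.com/A-wisnu/konversi-bilangan | konversi_bilangan.py | validasi_heksadesimal
-- ===== SOURCE A (Python) =====
-- def validasi_heksadesimal(bilangan):
--     """Validasi bilangan heksadesimal yang dimasukkan pengguna"""
--     try:
--         # Periksa apakah hanya terdiri dari 0-9 dan A-F (tidak case sensitive)
--         for digit in bilangan.upper():
--             if digit not in '0123456789ABCDEF':
--                 return False
--         return True
--     except:
--         return False
-- ===== SOURCE B (Python) =====
-- def validasi_heksadesimal(bilangan):
--     """Validasi bilangan heksadesimal yang dimasukkan pengguna"""
--     try: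
--         # prune hex digits from both ends; the whole string is hex
--         # exactly when nothing is left in the middle
--         return bilangan.strip('0123456789abcdefABCDEF') == ''
--     except:
--         return False
-- ===== Notes on version B (the rewrite author's own statement) =====
-- stated objective: idiomatic
-- what changed: Replaces A's forward per-character scan over the uppercased string (early return on first bad char) with a two-ended strip: str.strip with both-case hex digits prunes hex characters from the left and right ends, and the string is valid iff the residue is empty; no uppercasing and no explicit interpreter-level loop.
import Mathlib
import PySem

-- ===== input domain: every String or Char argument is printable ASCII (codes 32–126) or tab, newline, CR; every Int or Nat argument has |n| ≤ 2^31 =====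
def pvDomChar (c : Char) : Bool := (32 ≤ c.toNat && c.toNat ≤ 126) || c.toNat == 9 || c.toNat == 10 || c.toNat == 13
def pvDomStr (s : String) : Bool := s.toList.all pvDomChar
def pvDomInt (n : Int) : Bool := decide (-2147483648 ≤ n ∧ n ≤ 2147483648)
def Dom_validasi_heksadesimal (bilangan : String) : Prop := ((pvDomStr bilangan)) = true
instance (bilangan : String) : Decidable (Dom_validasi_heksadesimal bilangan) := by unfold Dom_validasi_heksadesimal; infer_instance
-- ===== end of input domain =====

-- B replaces A's forward per-character scan over the uppercased string with an
-- idiomatic two-ended strip test (str.strip with both-case hex digits leaves the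
-- empty string iff the whole string is hex); same Bool on every string, proved.


-- ===== PORT A =====
-- 'for digit in bilangan.upper(): if digit not in '0123456789ABCDEF': return False' / 'return True'
-- (the try/except can never fire for a str argument: upper() and 'in' on strings do not raise)
def validasiLoopA : List Char → Bool
  | [] => true
  | digit :: rest =>
    if ¬ (digit ∈ "0123456789ABCDEF".toList) then false
    else validasiLoopA rest

def validasi_heksadesimal (bilangan : String) : Bool :=
  validasiLoopA (PySem.Str.upper bilangan).toList

-- ===== PORT B =====
-- 'return bilangan.strip('0123456789abcdefABCDEF') == '''
-- (the try/except can never fire for a str argument: strip and == do not raise)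
def validasi_heksadesimal_alt (bilangan : String) : Bool :=
  PySem.Str.stripChars bilangan "0123456789abcdefABCDEF" == ""

-- ===== PRECONDITION & SPEC =====
def Spec_validasi_heksadesimal (bilangan : String) (out : Bool) : Prop := out = validasi_heksadesimal_alt bilangan
instance (bilangan : String) (out : Bool) : Decidable (Spec_validasi_heksadesimal bilangan out) := by unfold Spec_validasi_heksadesimal; infer_instance

-- ===== CLAIM (what is proved, stated in full; the proofs are below) =====
def Claim_equal_validasi_heksadesimal : Prop := ∀ (bilangan : String), Dom_validasi_heksadesimal bilangan → Spec_validasi_heksadesimal bilangan (validasi_heksadesimal bilangan)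

-- ===== LEMMAS AND PROOFS =====

-- per-character bridge: the uppercased char is an upper-case hex digit iff the char is a hex digit of either case
theorem upperChar_hex_iff (c : Char) :
    PySem.Chars.upperChar c ∈ "0123456789ABCDEF".toList ↔ c ∈ "0123456789abcdefABCDEF".toList := by
  simp only [PySem.Chars.upperChar, PySem.Chars.islower,
    show "0123456789ABCDEF".toList = ['0','1','2','3','4','5','6','7','8','9','A','B','C','D','E','F'] from rfl,
    show "0123456789abcdefABCDEF".toList = ['0','1','2','3','4','5','6','7','8','9','a','b','c','d','e','f','A','B','C','D','E','F'] from rfl]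
  split_ifs with h
  · simp only [Bool.and_eq_true, decide_eq_true_eq, Char.le_def, UInt32.le_iff_toNat_le] at h
    obtain ⟨n, hn1, hn2, rfl⟩ : ∃ n, 97 ≤ n ∧ n ≤ 122 ∧ c = Char.ofNat n :=
      ⟨c.toNat, h.1, h.2, (Char.ofNat_toNat c).symm⟩
    interval_cases n <;> decide
  · simp only [Bool.and_eq_true, decide_eq_true_eq, Char.le_def, not_and, UInt32.le_iff_toNat_le] at h
    simp only [List.mem_cons, List.not_mem_nil, or_false]
    constructor
    · tauto
    · rintro (h'|h'|h'|h'|h'|h'|h'|h'|h'|h'|h'|h'|h'|h'|h'|h'|h'|h'|h'|h'|h'|h') <;> subst h' <;> tauto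

-- A's loop returns true iff every character of its argument is an upper-case hex digit
theorem validasiLoopA_eq_all (l : List Char) :
    validasiLoopA l = true ↔ ∀ c ∈ l, c ∈ "0123456789ABCDEF".toList := by
  induction l with
  | nil => simp [validasiLoopA]
  | cons d rest ih =>
    by_cases h : d ∈ "0123456789ABCDEF".toList
    · rw [validasiLoopA, if_neg (not_not_intro h)]
      simp only [List.forall_mem_cons, ih]
      exact (and_iff_right h).symm
    · rw [validasiLoopA, if_pos h]
      simp only [Bool.false_eq_true, false_iff]
      intro hall
      exact h (hall d (List.mem_cons_self))

-- stripping p-chars from both ends leaves [] iff every char satisfies p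
theorem stripChars_eq_nil_iff (s chars : List Char) :
    PySem.Chars.stripChars s chars = [] ↔ ∀ c ∈ s, chars.contains c = true := by
  unfold PySem.Chars.stripChars
  rw [List.reverse_eq_nil_iff, List.dropWhile_eq_nil_iff]
  constructor
  · intro h c hc
    by_cases hmem : c ∈ (List.dropWhile (fun c => chars.contains c) s)
    · exact h c (List.mem_reverse.mpr hmem)
    · -- c is in the takeWhile part, where the predicate holds
      have hsplit := List.takeWhile_append_dropWhile (p := fun c => chars.contains c) (l := s)
      rw [← hsplit, List.mem_append] at hc
      rcases hc with hc | hc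
      · exact List.mem_takeWhile_imp hc
      · exact absurd hc hmem
  · intro h c hc
    exact h c ((List.dropWhile_sublist _).mem (List.mem_reverse.mp hc))

theorem validasi_heksadesimal_eq (bilangan : String) :
    validasi_heksadesimal bilangan = validasi_heksadesimal_alt bilangan := by
  rw [Bool.eq_iff_iff]
  unfold validasi_heksadesimal validasi_heksadesimal_alt
  rw [validasiLoopA_eq_all, beq_iff_eq, ← String.toList_inj, PySem.Str.toList_stripChars,
    show ("" : String).toList = [] from rfl, stripChars_eq_nil_iff]
  simp only [PySem.Str.toList_upper, PySem.Chars.upper, List.mem_map,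
    forall_exists_index, and_imp, forall_apply_eq_imp_iff₂, List.contains_eq_mem,
    decide_eq_true_eq]
  constructor
  · intro hall c hc
    exact (upperChar_hex_iff c).mp (hall c hc)
  · intro hall c hc
    exact (upperChar_hex_iff c).mpr (hall c hc)

-- ===== VERDICT (by name: the statement is the Claim_ definition above) =====
theorem validasi_heksadesimal_spec : Claim_equal_validasi_heksadesimal := by
  intro bilangan _
  exact validasi_heksadesimal_eq bilangan
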